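-- pv_equiv track=rewrite | github.com/ffreemt/codewars-solutions | python/prefix_suffix.py | solve
-- ===== SOURCE A (Python) =====
-- def solve(st):
--     n = len(st)
--     pre = []
--     suf = []
--     for elm in range(1, n):
--         pre.append(st[:elm])
--         suf.append(st[elm:])
--
--     for elm in pre[::-1]:
--         if elm in suf:
--             if len(elm) < n // 2:
--                 return len(elm)
--     return 0
-- ===== SOURCE B (Python) =====
-- def solve(st):
--     n = len(st)
--     for ln in range(n // 2 - 1, 0, -1):
--         if st[:ln] == st[n - ln:]:
--             return ln
--     return 0
-- ===== Notes on version B (the rewrite author's own statement) =====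
-- stated objective: faster
-- what changed: Instead of materialising all prefixes and suffixes and testing list membership for each prefix, B directly compares st[:ln] with st[n-ln:] for ln descending from n//2-1 only, returning the first match.
import Mathlib
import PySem

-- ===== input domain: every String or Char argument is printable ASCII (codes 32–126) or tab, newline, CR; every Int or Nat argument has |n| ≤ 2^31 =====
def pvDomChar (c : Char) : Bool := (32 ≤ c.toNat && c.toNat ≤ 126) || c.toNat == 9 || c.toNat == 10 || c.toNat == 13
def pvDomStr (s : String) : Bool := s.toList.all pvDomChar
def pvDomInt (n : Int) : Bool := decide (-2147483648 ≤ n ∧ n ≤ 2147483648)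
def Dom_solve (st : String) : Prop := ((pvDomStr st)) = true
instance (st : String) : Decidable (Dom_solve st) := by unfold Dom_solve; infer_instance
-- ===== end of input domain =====

-- B scans lengths below n//2 top-down comparing prefix with suffix directly, instead of A's
-- quadratic-size prefix/suffix lists with an O(n^2) membership test per candidate.

-- ===== PORT A =====
-- second loop of A: 'for elm in pre[::-1]: if elm in suf: if len(elm) < n//2: return len(elm)'
def pvScanA (suf : List (List Char)) (nd2 : Int) : List (List Char) → Int
  | [] => 0
  | e :: rest =>
      if e ∈ suf then
        (if (e.length : Int) < nd2 then (e.length : Int) else pvScanA suf nd2 rest)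
      else pvScanA suf nd2 rest

def solve (st : String) : Int :=
  let s := st.toList
  let n : Int := PySem.Str.len st
  let ps := (PySem.List.pyRange 1 n 1).foldl
    (fun (acc : List (List Char) × List (List Char)) e =>
      (acc.1 ++ [PySem.List.slice s none (some e)], acc.2 ++ [PySem.List.slice s (some e) none]))
    ([], [])
  pvScanA ps.2 (PySem.Int.floordiv n 2) ((PySem.List.slice? ps.1 none none (-1)).getD [])

-- ===== PORT B =====
-- B's loop: 'for ln in range(n//2 - 1, 0, -1): if st[:ln] == st[n-ln:]: return ln'
def pvScanB (s : List Char) (n : Int) : List Int → Int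
  | [] => 0
  | ln :: rest =>
      if PySem.List.slice s none (some ln) = PySem.List.slice s (some (n - ln)) none then ln
      else pvScanB s n rest

def solve_alt (st : String) : Int :=
  let s := st.toList
  let n : Int := PySem.Str.len st
  pvScanB s n (PySem.List.pyRange (PySem.Int.floordiv n 2 - 1) 0 (-1))

-- ===== PRECONDITION & SPEC =====
def Spec_solve (st : String) (out : Int) : Prop := out = solve_alt st
instance (st : String) (out : Int) : Decidable (Spec_solve st out) := by unfold Spec_solve; infer_instance

-- ===== CLAIM (what is proved, stated in full; the proofs are below) =====
def Claim_equal_solve : Prop := ∀ (st : String), Dom_solve st → Spec_solve st (solve st)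

-- ===== LEMMAS AND PROOFS =====

-- lengths ≥ n//2 are skipped by A's scan (the 'len(elm) < n//2' test fails)
lemma pvScanA_skip_hi (s : List Char) (suf : List (List Char)) (nd2 : Int)
    (hn : nd2 ≤ (s.length : Int)) (ls : List Int) (h : ∀ L ∈ ls, nd2 ≤ L ∧ 0 ≤ L) (rest : List (List Char)) :
    pvScanA suf nd2 ((ls.map (fun L => PySem.List.slice s none (some L))) ++ rest)
      = pvScanA suf nd2 rest := by
  induction ls with
  | nil => simp
  | cons L tl ih =>
    obtain ⟨hL, h0⟩ := h L (by simp)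
    have hlen : ¬ (((PySem.List.slice s none (some L)).length : Int) < nd2) := by
      rw [PySem.List.slice_to s h0, List.length_take]
      push_cast
      omega
    have ih' := ih (fun x hx => h x (by simp [hx]))
    by_cases hm : PySem.List.slice s none (some L) ∈ suf <;>
      simp [pvScanA, hm, hlen, ih']

-- a prefix of length 1 ≤ L ≤ n-1 occurs in A's suffix list iff it equals the suffix of the same length
lemma pvSuf_mem (s : List Char) (L : Int) (h1 : 1 ≤ L) (h2 : L < (s.length : Int)) :
    (PySem.List.slice s none (some L)
        ∈ (PySem.List.pyRange 1 (s.length : Int) 1).map (fun e => PySem.List.slice s (some e) none))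
      ↔ PySem.List.slice s none (some L) = PySem.List.slice s (some ((s.length : Int) - L)) none := by
  constructor
  · intro hmem
    obtain ⟨e, he, heq⟩ := List.mem_map.mp hmem
    obtain ⟨he1, he2⟩ := PySem.List.mem_pyRange_one.mp he
    have h0e : (0 : Int) ≤ e := by omega
    have hlen := congrArg List.length heq
    rw [PySem.List.slice_from s h0e, PySem.List.slice_to s (by omega), List.length_take,
      List.length_drop] at hlen
    have hee : e = (s.length : Int) - L := by omega
    rw [hee] at heq
    exact heq.symm
  · intro hC
    exact List.mem_map.mpr ⟨(s.length : Int) - L, PySem.List.mem_pyRange_one.mpr ⟨by omega, by omega⟩, hC.symm⟩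

-- below n//2 A's scan computes exactly B's scan
lemma pvScanA_lo (s : List Char) (nd2 : Int) (hn : 2 * nd2 ≤ (s.length : Int))
    (ls : List Int) (h : ∀ L ∈ ls, 1 ≤ L ∧ L < nd2) :
    pvScanA ((PySem.List.pyRange 1 (s.length : Int) 1).map (fun e => PySem.List.slice s (some e) none))
        nd2 (ls.map (fun L => PySem.List.slice s none (some L)))
      = pvScanB s (s.length : Int) ls := by
  induction ls with
  | nil => simp [pvScanA, pvScanB]
  | cons L tl ih =>
    obtain ⟨h1, h2⟩ := h L (by simp)
    have hmem := pvSuf_mem s L h1 (by omega)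
    have hlen : (((PySem.List.slice s none (some L)).length : Int)) = L := by
      rw [PySem.List.slice_to s (by omega), List.length_take]
      push_cast
      omega
    have ih' := ih (fun x hx => h x (by simp [hx]))
    by_cases hC : PySem.List.slice s none (some L) = PySem.List.slice s (some ((s.length : Int) - L)) none
    · simp only [List.map_cons, pvScanA, pvScanB]
      rw [if_pos (hmem.mpr hC), if_pos (by rw [hlen]; exact h2), hlen, if_pos hC]
    · simp only [List.map_cons, pvScanA, pvScanB]
      rw [if_neg (fun hmm => hC (hmem.mp hmm)), if_neg hC, ih']

theorem solve_eq (st : String) : solve st = solve_alt st := by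
  unfold solve solve_alt
  simp only [PySem.Str.len_eq]
  set s := st.toList with hs
  rw [PySem.List.foldl_prod_mk (fun l e => l ++ [PySem.List.slice s none (some e)])
      (fun l e => l ++ [PySem.List.slice s (some e) none])]
  simp only [PySem.List.foldl_append_singleton_eq_map, List.nil_append,
    PySem.List.slice?_none_none_neg_one, Option.getD_some]
  set nd2 : Int := PySem.Int.floordiv (s.length : Int) 2 with hnd2
  have hnd2' : nd2 = ((s.length / 2 : Nat) : Int) := by
    rw [hnd2]
    exact_mod_cast PySem.Int.floordiv_natCast s.length 2
  have h0 : (0 : Int) ≤ nd2 := by omega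
  have h2n : 2 * nd2 ≤ (s.length : Int) := by omega
  rw [← List.map_reverse]
  by_cases hc : 1 ≤ nd2
  · have hsplit : (PySem.List.pyRange 1 (s.length : Int) 1).reverse
        = (PySem.List.pyRange nd2 (s.length : Int) 1).reverse ++ (PySem.List.pyRange 1 nd2 1).reverse := by
      rw [PySem.List.pyRange_one_append 1 nd2 (s.length : Int) hc (by omega), List.reverse_append]
    rw [hsplit, List.map_append]
    rw [pvScanA_skip_hi s _ nd2 (by omega) _
      (fun L hL => by
        have := PySem.List.mem_pyRange_one.mp (List.mem_reverse.mp hL)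
        omega)]
    rw [pvScanA_lo s nd2 h2n _
      (fun L hL => by
        have := PySem.List.mem_pyRange_one.mp (List.mem_reverse.mp hL)
        omega)]
    rw [PySem.List.pyRange_neg_one_eq_reverse]
    norm_num
  · rw [PySem.List.pyRange_neg_one_eq_nil (by omega)]
    have := pvScanA_skip_hi s
      ((PySem.List.pyRange 1 (s.length : Int) 1).map (fun e => PySem.List.slice s (some e) none))
      nd2 (by omega) (PySem.List.pyRange 1 (s.length : Int) 1).reverse
      (fun L hL => by
        have := PySem.List.mem_pyRange_one.mp (List.mem_reverse.mp hL)
        omega) []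
    rw [List.append_nil] at this
    rw [this]
    simp [pvScanA, pvScanB]

-- ===== VERDICT (by name: the statement is the Claim_ definition above) =====
theorem solve_spec : Claim_equal_solve := by
  intro st _
  unfold Spec_solve
  exact solve_eq st
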